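-- pv_equiv track=rewrite | github.com/ayanbsw98/qgss-2025 | lab-4/generate_error_table.py | pauli_commute
-- ===== SOURCE A (Python) =====
-- def pauli_commute(pauli1, pauli2):
--     """
--     Check if two Pauli strings commute.
--     Returns True if they commute, False if they anti-commute.
--
--     Two Pauli operators commute if the number of positions where they
--     have different non-identity operators is even.
--     Commutation rules:
--     - I commutes with everything
--     - X anti-commutes with Z and Y
--     - Y anti-commutes with X and Z
--     - Z anti-commutes with X and Y
--     - Same operators (XX, YY, ZZ) commute
--     """
--     if len(pauli1) != len(pauli2):
--         raise ValueError("Pauli strings must have same length")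
--
--     anti_commute_count = 0
--     for p1, p2 in zip(pauli1, pauli2):
--         # Count positions where operators anti-commute
--         if (p1 == 'X' and p2 in ['Y', 'Z']) or \
--            (p1 == 'Y' and p2 in ['X', 'Z']) or \
--            (p1 == 'Z' and p2 in ['X', 'Y']):
--             anti_commute_count += 1
--
--     # If odd number of anti-commuting pairs, overall anti-commute
--     return anti_commute_count % 2 == 0
-- ===== SOURCE B (Python) =====
-- NONID = frozenset('XYZ')
--
-- def pauli_commute(pauli1, pauli2):
--     if len(pauli1) != len(pauli2):
--         raise ValueError("Pauli strings must have same length")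
--     support1 = {i for i, c in enumerate(pauli1) if c in NONID}
--     support2 = {i for i, c in enumerate(pauli2) if c in NONID}
--     differ = {i for i, (a, b) in enumerate(zip(pauli1, pauli2)) if a != b}
--     return len(support1 & support2 & differ) % 2 == 0
-- ===== Notes on version B (the rewrite author's own statement) =====
-- stated objective: alternative
-- what changed: Replaces the single-pass counter with an explicit three-branch anti-commutation table by a set-theoretic formulation: build the index sets of non-identity symbols of each string and the set of positions where they differ, intersect them, and test the parity of the intersection's size.
import Mathlib
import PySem

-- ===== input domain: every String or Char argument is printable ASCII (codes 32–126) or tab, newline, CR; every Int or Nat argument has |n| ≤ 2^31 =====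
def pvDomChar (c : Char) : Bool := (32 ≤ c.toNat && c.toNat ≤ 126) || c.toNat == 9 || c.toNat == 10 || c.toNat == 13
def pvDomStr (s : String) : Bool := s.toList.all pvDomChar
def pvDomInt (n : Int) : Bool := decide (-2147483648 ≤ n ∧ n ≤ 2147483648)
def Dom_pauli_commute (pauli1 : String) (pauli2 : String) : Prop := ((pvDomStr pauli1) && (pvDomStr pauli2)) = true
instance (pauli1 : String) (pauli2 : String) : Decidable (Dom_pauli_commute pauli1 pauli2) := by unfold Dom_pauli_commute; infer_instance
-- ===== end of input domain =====

-- B recasts A's branch-counting loop set-theoretically: intersect the non-identity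
-- support sets of both strings with the set of differing positions and test the
-- parity of the intersection's size (objective: alternative; same cost).

-- ===== PORT A =====
def pauli_commute (pauli1 : String) (pauli2 : String) : Bool :=
  let cnt : Int := (pauli1.toList.zip pauli2.toList).foldl
    (fun acc pq =>
      if (pq.1 == 'X' && (pq.2 == 'Y' || pq.2 == 'Z')) ||
         (pq.1 == 'Y' && (pq.2 == 'X' || pq.2 == 'Z')) ||
         (pq.1 == 'Z' && (pq.2 == 'X' || pq.2 == 'Y')) then acc + 1 else acc) 0
  PySem.Int.mod cnt 2 == 0

-- ===== PORT B =====
-- c in NONID  (NONID = frozenset('XYZ'))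
def pvNonId (ic : Int × Char) : Bool := ['X', 'Y', 'Z'].contains ic.2
-- a != b  (on an enumerated zip entry)
def pvNe (ip : Int × (Char × Char)) : Bool := ip.2.1 != ip.2.2
-- the index comprehension {i for i, v in enumerate(l) if g(i, v)} before set()
def pvIdx {β : Type} (g : Int × β → Bool) (s : Int) (l : List β) : List Int :=
  ((PySem.List.enumerate l s).filter g).map (·.1)

-- support = {i for i, c in enumerate(s) if c in NONID}
def pvSupport (l : List Char) : PySem.Set Int := PySem.Set.ofList (pvIdx pvNonId 0 l)
-- differ = {i for i, (a, b) in enumerate(zip(pauli1, pauli2)) if a != b}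
def pvDiffer (l1 l2 : List Char) : PySem.Set Int := PySem.Set.ofList (pvIdx pvNe 0 (l1.zip l2))

def pauli_commute_alt (pauli1 : String) (pauli2 : String) : Bool :=
  let anti := PySem.Set.inter
    (PySem.Set.inter (pvSupport pauli1.toList) (pvSupport pauli2.toList))
    (pvDiffer pauli1.toList pauli2.toList)
  PySem.Int.mod (PySem.Set.len anti) 2 == 0

-- ===== PRECONDITION & SPEC =====
-- A raises ValueError when the two strings have different lengths; Pre_ excludes exactly those.
def Pre_pauli_commute (pauli1 : String) (pauli2 : String) : Prop :=
  pauli1.toList.length = pauli2.toList.length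
instance (pauli1 : String) (pauli2 : String) : Decidable (Pre_pauli_commute pauli1 pauli2) := by
  unfold Pre_pauli_commute; infer_instance

def pvWitness_pauli_commute : String × String := ("XYZI", "ZZXq")

def Spec_pauli_commute (pauli1 : String) (pauli2 : String) (out : Bool) : Prop := out = pauli_commute_alt pauli1 pauli2
instance (pauli1 : String) (pauli2 : String) (out : Bool) : Decidable (Spec_pauli_commute pauli1 pauli2 out) := by unfold Spec_pauli_commute; infer_instance

-- ===== CLAIM (what is proved, stated in full; the proofs are below) =====
def Claim_equal_pauli_commute : Prop := ∀ (pauli1 : String) (pauli2 : String), Dom_pauli_commute pauli1 pauli2 → Pre_pauli_commute pauli1 pauli2 → Spec_pauli_commute pauli1 pauli2 (pauli_commute pauli1 pauli2)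

-- ===== LEMMAS AND PROOFS =====

-- A's per-position anti-commutation test
def pvCondA (pq : Char × Char) : Bool :=
  (pq.1 == 'X' && (pq.2 == 'Y' || pq.2 == 'Z')) ||
  (pq.1 == 'Y' && (pq.2 == 'X' || pq.2 == 'Z')) ||
  (pq.1 == 'Z' && (pq.2 == 'X' || pq.2 == 'Y'))

-- B's per-position test: both non-identity and different
def pvCondB (pq : Char × Char) : Bool :=
  ['X', 'Y', 'Z'].contains pq.1 && ['X', 'Y', 'Z'].contains pq.2 && pq.1 != pq.2

lemma conds_eq (pq : Char × Char) : pvCondA pq = pvCondB pq := by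
  rcases pq with ⟨c, d⟩
  by_cases hx : c = 'X' <;> by_cases hy : c = 'Y' <;> by_cases hz : c = 'Z' <;>
  by_cases kx : d = 'X' <;> by_cases ky : d = 'Y' <;> by_cases kz : d = 'Z' <;>
    simp_all [pvCondA, pvCondB]

lemma pvIdx_nodup {β : Type} (g : Int × β → Bool) (s : Int) (l : List β) :
    (pvIdx g s l).Nodup := by
  have h := (PySem.List.pairwise_lt_enumerate l s).filter g
  have h2 : (pvIdx g s l).Pairwise (· < ·) := by
    unfold pvIdx; exact List.pairwise_map.mpr h
  exact h2.imp (fun hlt => ne_of_lt hlt)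

lemma pvIdx_ge {β : Type} (g : Int × β → Bool) (s : Int) (l : List β) (i : Int)
    (h : i ∈ pvIdx g s l) : s ≤ i := by
  unfold pvIdx at h
  obtain ⟨p, hp, rfl⟩ := List.mem_map.mp h
  obtain ⟨k, hk, rfl⟩ := (PySem.List.mem_enumerate_iff l s p).mp (List.mem_filter.mp hp).1
  simp

lemma pvIdx_cons {β : Type} (g : Int × β → Bool) (s : Int) (x : β) (l : List β) :
    pvIdx g s (x :: l) = (if g (s, x) then [s] else []) ++ pvIdx g (s + 1) l := by
  unfold pvIdx
  rw [PySem.List.enumerate_cons]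
  by_cases h : g (s, x) <;> simp [h]

lemma contains_head {β : Type} (g : Int × β → Bool) (s : Int) (x : β) (l : List β) :
    ((if g (s, x) then [s] else []) ++ pvIdx g (s + 1) l).contains s = g (s, x) := by
  have hns : s ∉ pvIdx g (s + 1) l :=
    fun hh => absurd (pvIdx_ge g (s + 1) l s hh) (by omega)
  by_cases h : g (s, x) <;> simp [h, List.contains_eq_mem, hns]

lemma contains_tail {β : Type} (g : Int × β → Bool) (s : Int) (x : β) (l : List β)
    (i : Int) (hi : s + 1 ≤ i) :
    ((if g (s, x) then [s] else []) ++ pvIdx g (s + 1) l).contains i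
      = (pvIdx g (s + 1) l).contains i := by
  by_cases h : g (s, x) <;>
    simp [h, List.contains_eq_mem, show ¬ i = s by omega]

-- head contribution of one position to the double filter
lemma head_len {β γ : Type} (g : Int × β → Bool) (gd : Int × γ → Bool) (s : Int)
    (a b : β) (c : γ) (l2 : List β) (ld : List γ) :
    (List.filter (fun i => ((if gd (s, c) then [s] else []) ++ pvIdx gd (s + 1) ld).contains i)
      (List.filter (fun i => ((if g (s, b) then [s] else []) ++ pvIdx g (s + 1) l2).contains i)
        (if g (s, a) then [s] else []))).length
    = if g (s, a) && g (s, b) && gd (s, c) then 1 else 0 := by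
  by_cases hA : g (s, a)
  · simp only [hA, if_true, List.filter_cons, List.filter_nil, contains_head]
    by_cases hB : g (s, b)
    · simp only [hB, if_true, List.filter_cons, List.filter_nil, contains_head]
      by_cases hD : gd (s, c) <;> simp [hD]
    · simp [hB]
  · simp [hA]

-- main B-side counting lemma, generalized over the start index
lemma inter_len (s : Int) (l1 l2 : List Char) (h : l1.length = l2.length) :
    ((List.filter (fun i => (pvIdx pvNe s (l1.zip l2)).contains i)
        (List.filter (fun i => (pvIdx pvNonId s l2).contains i)
          (pvIdx pvNonId s l1)))).length
      = (l1.zip l2).countP pvCondB := by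
  induction l1 generalizing l2 s with
  | nil => simp [pvIdx, PySem.List.enumerate_nil]
  | cons a t1 ih =>
    cases l2 with
    | nil => simp at h
    | cons b t2 =>
      simp only [List.length_cons] at h
      have hlen : t1.length = t2.length := by omega
      rw [List.zip_cons_cons, pvIdx_cons pvNonId, pvIdx_cons pvNonId, pvIdx_cons pvNe]
      rw [List.filter_append]
      have ht1 : List.filter
            (fun i => ((if pvNonId (s, b) then [s] else []) ++ pvIdx pvNonId (s + 1) t2).contains i)
            (pvIdx pvNonId (s + 1) t1)
          = List.filter (fun i => (pvIdx pvNonId (s + 1) t2).contains i)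
            (pvIdx pvNonId (s + 1) t1) := by
        apply List.filter_congr
        intro i hi
        exact contains_tail pvNonId s b t2 i (pvIdx_ge pvNonId (s + 1) t1 i hi)
      rw [ht1, List.filter_append]
      have ht2 : List.filter
            (fun i => ((if pvNe (s, (a, b)) then [s] else []) ++ pvIdx pvNe (s + 1) (t1.zip t2)).contains i)
            (List.filter (fun i => (pvIdx pvNonId (s + 1) t2).contains i)
              (pvIdx pvNonId (s + 1) t1))
          = List.filter (fun i => (pvIdx pvNe (s + 1) (t1.zip t2)).contains i)
            (List.filter (fun i => (pvIdx pvNonId (s + 1) t2).contains i)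
              (pvIdx pvNonId (s + 1) t1)) := by
        apply List.filter_congr
        intro i hi
        exact contains_tail pvNe s (a, b) (t1.zip t2) i
          (pvIdx_ge pvNonId (s + 1) t1 i (List.mem_of_mem_filter hi))
      rw [ht2, List.length_append, ih (s + 1) t2 hlen,
        head_len pvNonId pvNe s a b (a, b) t2 (t1.zip t2), List.countP_cons]
      exact Nat.add_comm _ _

-- ===== VERDICT (by name: the statement is the Claim_ definition above) =====
theorem pauli_commute_spec : Claim_equal_pauli_commute := by
  intro p1 p2 _ hpre
  unfold Spec_pauli_commute pauli_commute pauli_commute_alt pvSupport pvDiffer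
  simp only [PySem.List.foldl_if_add_one,
    PySem.Set.ofList_eq_self_of_nodup _ (pvIdx_nodup pvNonId 0 p1.toList),
    PySem.Set.ofList_eq_self_of_nodup _ (pvIdx_nodup pvNonId 0 p2.toList),
    PySem.Set.ofList_eq_self_of_nodup _ (pvIdx_nodup pvNe 0 (p1.toList.zip p2.toList)),
    PySem.Set.inter, PySem.Set.len, PySem.Set.contains]
  rw [inter_len 0 p1.toList p2.toList hpre, zero_add]
  have hc : List.countP pvCondA (p1.toList.zip p2.toList)
      = List.countP pvCondB (p1.toList.zip p2.toList) :=
    List.countP_congr (fun a _ => iff_of_eq (congrArg (· = true) (conds_eq a)))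
  exact congrArg (fun n : Nat => (PySem.Int.mod (n : Int) 2 == 0)) hc
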